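-- pv_equiv track=rewrite | github.com/RESH-22/UNSTOP-100-DAYS-CODING-SPRINT | Day 23/SPECIAL MESSAGE.py | specialmsg
-- ===== SOURCE A (Python) =====
-- def specialmsg(s, vocab):
--     # Step 1: build dictionary
--     mp = {}
--     for key, val in vocab:
--         mp[key] = val
--
--     result = []
--     i = 0
--     n = len(s)
--
--     while i < n:
--         if s[i] == '(':
--             j = i + 1
--
--             # find closing bracket
--             while j < n and s[j] != ')':
--                 j += 1
--
--             key = s[i + 1:j]  # extract inside
--
--             # replace
--             if key in mp:
--                 result.append(mp[key])
--             else: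
--                 result.append("?")
--
--             i = j + 1  # move after ')'
--
--         else:
--             result.append(s[i])
--             i += 1
--
--     return "".join(result)
-- ===== SOURCE B (Python) =====
-- def specialmsg(s, vocab):
--     # chunk-wise: jump between brackets with str.find and copy slices,
--     # instead of A's char-by-char index loop
--     mp = dict(vocab)
--     out = []
--     i = 0
--     while True:
--         p = s.find('(', i)
--         if p == -1:
--             out.append(s[i:])
--             break
--         out.append(s[i:p])
--         q = s.find(')', p + 1)
--         if q == -1:
--             out.append(mp.get(s[p + 1:], "?"))
--             break
--         out.append(mp.get(s[p + 1:q], "?"))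
--         i = q + 1
--     return "".join(out)
-- ===== Notes on version B (the rewrite author's own statement) =====
-- stated objective: faster
-- what changed: Replaces A's char-by-char index loop that appends one character at a time with a chunk-wise scan that jumps between brackets via str.find and copies whole slices.
import Mathlib
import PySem

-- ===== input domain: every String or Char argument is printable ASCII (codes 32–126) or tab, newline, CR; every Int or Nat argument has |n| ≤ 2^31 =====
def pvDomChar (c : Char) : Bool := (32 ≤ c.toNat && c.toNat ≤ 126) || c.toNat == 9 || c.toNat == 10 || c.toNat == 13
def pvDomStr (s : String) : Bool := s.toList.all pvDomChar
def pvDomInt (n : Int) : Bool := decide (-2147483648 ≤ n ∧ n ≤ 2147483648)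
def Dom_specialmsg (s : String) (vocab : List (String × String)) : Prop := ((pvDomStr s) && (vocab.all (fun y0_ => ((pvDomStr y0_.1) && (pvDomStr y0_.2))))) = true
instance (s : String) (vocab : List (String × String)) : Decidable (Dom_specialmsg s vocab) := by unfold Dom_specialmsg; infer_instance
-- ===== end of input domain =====

-- B replaces A's char-by-char index loop with a chunk-wise scan that jumps between
-- brackets (str.find) and copies whole slices; same O(n), measurably faster constants.


-- ===== PORT A =====
-- A's inner loop 'while j < n and s[j] != ')'' on the remaining characters;
-- returns (key = s[i+1:j], characters from index j+1 on).
def specialmsgScan : List Char → List Char × List Char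
  | [] => ([], [])
  | c :: cs =>
    if c = ')' then ([], cs)
    else
      let r := specialmsgScan cs
      (c :: r.1, r.2)

theorem specialmsgScan_snd_le (l : List Char) : (specialmsgScan l).2.length ≤ l.length := by
  induction l with
  | nil => simp [specialmsgScan]
  | cons c cs ih => by_cases h : c = ')' <;> simp [specialmsgScan, h] <;> omega

-- A's outer 'while i < n' loop; position i is represented by the remaining suffix s[i:].
def specialmsgGoA (mp : PySem.Dict String String) : List Char → List String
  | [] => []
  | c :: cs =>
    if c = '(' then
      let r := specialmsgScan cs
      (mp.getD (String.ofList r.1) "?") :: specialmsgGoA mp r.2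
    else
      String.ofList [c] :: specialmsgGoA mp cs
termination_by l => l.length
decreasing_by
  · have := specialmsgScan_snd_le cs; simp; omega
  · simp

def specialmsg (s : String) (vocab : List (String × String)) : String :=
  PySem.Str.join "" (specialmsgGoA (PySem.Dict.ofList vocab) s.toList)

-- ===== PORT B =====
-- B's loop body on the suffix s[i:]: s.find('(', i) / s.find(')', p+1) with the
-- slices s[i:p], s[p+1:q] are rendered as takeWhile/dropWhile at the sought
-- character ('find returned -1' = the dropWhile result is empty; '+1' = .tail).
def specialmsgGoB (mp : PySem.Dict String String) (l : List Char) : List String :=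
  let pre := l.takeWhile (· != '(')           -- s[i:p]  (s[i:] when p = -1)
  let rest := l.dropWhile (· != '(')
  if rest = [] then [String.ofList pre]       -- p == -1: append s[i:], break
  else
    let after := rest.tail                    -- s[p+1:]
    let key := after.takeWhile (· != ')')     -- s[p+1:q]  (s[p+1:] when q = -1)
    let tail := after.dropWhile (· != ')')
    if tail = [] then [String.ofList pre, mp.getD (String.ofList key) "?"]  -- q == -1
    else String.ofList pre :: mp.getD (String.ofList key) "?" :: specialmsgGoB mp tail.tail
termination_by l.length
decreasing_by
  simp only [pre, rest, after, tail, List.length_tail] at *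
  have h1 : (l.dropWhile (· != '(')).length ≤ l.length := List.length_dropWhile_le ..
  have h3 : ((l.dropWhile (· != '(')).tail.dropWhile (· != ')')).length ≤
      (l.dropWhile (· != '(')).tail.length := List.length_dropWhile_le ..
  have h4 : 0 < (l.dropWhile (· != '(')).length := List.length_pos_iff.mpr (by assumption)
  have h5 : 0 < ((l.dropWhile (· != '(')).tail.dropWhile (· != ')')).length :=
    List.length_pos_iff.mpr (by assumption)
  have h2 : (l.dropWhile (· != '(')).tail.length = (l.dropWhile (· != '(')).length - 1 :=
    List.length_tail ..
  omega

def specialmsg_alt (s : String) (vocab : List (String × String)) : String :=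
  PySem.Str.join "" (specialmsgGoB (PySem.Dict.ofList vocab) s.toList)

-- ===== PRECONDITION & SPEC =====
def Spec_specialmsg (s : String) (vocab : List (String × String)) (out : String) : Prop := out = specialmsg_alt s vocab
instance (s : String) (vocab : List (String × String)) (out : String) : Decidable (Spec_specialmsg s vocab out) := by unfold Spec_specialmsg; infer_instance

-- ===== CLAIM (what is proved, stated in full; the proofs are below) =====
def Claim_equal_specialmsg : Prop := ∀ (s : String) (vocab : List (String × String)), Dom_specialmsg s vocab → Spec_specialmsg s vocab (specialmsg s vocab)

-- ===== LEMMAS AND PROOFS =====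

theorem chars_join_nil (xss : List (List Char)) : PySem.Chars.join [] xss = xss.flatten := by
  simp [PySem.Chars.join, List.intercalate]
  induction xss with
  | nil => rfl
  | cons x xs ih => cases xs <;> simp_all [List.intersperse]

-- A's loop emits each non-'(' character as its own singleton string
theorem goA_pre (mp : PySem.Dict String String) (pre rest : List Char)
    (hpre : ∀ c ∈ pre, (c != '(') = true) :
    specialmsgGoA mp (pre ++ rest) =
      pre.map (fun c => String.ofList [c]) ++ specialmsgGoA mp rest := by
  induction pre with
  | nil => simp
  | cons c cs ih =>
    have hc : c ≠ '(' := by simpa using hpre c (by simp)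
    rw [List.cons_append, specialmsgGoA]
    simp only [hc, if_false, List.map_cons, List.cons_append]
    rw [ih (fun d hd => hpre d (by simp [hd]))]

-- A's inner scan, characterised by takeWhile/dropWhile at ')'
theorem scan_eq (l : List Char) :
    specialmsgScan l = (l.takeWhile (· != ')'), (l.dropWhile (· != ')')).tail) := by
  induction l with
  | nil => simp [specialmsgScan]
  | cons c cs ih =>
    by_cases h : c = ')' <;> simp [specialmsgScan, h, ih]

-- singleton strings flatten back to the character list
theorem flat_singletons (cs : List Char) :
    ((cs.map (fun c => String.ofList [c])).map String.toList).flatten = cs := by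
  induction cs with
  | nil => rfl
  | cons c cs ih => simpa using ih

-- the flattened character output of the two loops agrees
theorem go_flat (mp : PySem.Dict String String) (l : List Char) :
    ((specialmsgGoA mp l).map String.toList).flatten =
    ((specialmsgGoB mp l).map String.toList).flatten := by
  unfold specialmsgGoB
  have hl : l.takeWhile (· != '(') ++ l.dropWhile (· != '(') = l :=
    List.takeWhile_append_dropWhile
  have hpre : ∀ c ∈ l.takeWhile (· != '('), (c != '(') = true :=
    fun c hc => List.mem_takeWhile_imp (p := fun x => x != '(') hc
  cases hrest : l.dropWhile (· != '(') with
  | nil =>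
    have h0 := goA_pre mp (l.takeWhile (· != '(')) [] hpre
    rw [List.append_nil] at h0
    rw [hrest, List.append_nil] at hl
    conv_lhs => rw [← hl]
    rw [h0]
    simp only [specialmsgGoA, List.append_nil]
    rw [flat_singletons]
    simp
  | cons c after =>
    have hc : c = '(' := by
      have := List.head?_dropWhile_not (p := (· != '(')) (l := l)
      rw [hrest] at this
      simpa using this
    subst hc
    rw [hrest] at hl
    conv_lhs => rw [← hl]
    rw [goA_pre mp _ _ hpre, specialmsgGoA]
    simp only [reduceIte, scan_eq, List.tail_cons, reduceCtorEq, if_false,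
      List.map_append, List.flatten_append]
    rw [flat_singletons]
    cases htail : after.dropWhile (· != ')') with
    | nil =>
      simp [specialmsgGoA]
    | cons d t =>
      simp only [List.tail_cons, reduceCtorEq, if_false, List.map_cons, List.flatten_cons,
        String.toList_ofList]
      rw [go_flat mp t]
termination_by l.length
decreasing_by
  have h1 : (l.dropWhile (· != '(')).length ≤ l.length := List.length_dropWhile_le ..
  have h3 : (after.dropWhile (· != ')')).length ≤ after.length := List.length_dropWhile_le ..
  rw [hrest] at h1; rw [htail] at h3; simp at h1 h3; omega

-- ===== VERDICT (by name: the statement is the Claim_ definition above) =====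
theorem specialmsg_spec : Claim_equal_specialmsg := by
  intro s vocab _
  unfold Spec_specialmsg specialmsg specialmsg_alt
  apply String.toList_inj.mp
  rw [PySem.Str.toList_join, PySem.Str.toList_join]
  simp only [String.toList_empty]
  rw [chars_join_nil, chars_join_nil]
  exact go_flat (PySem.Dict.ofList vocab) s.toList
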